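-- pv_equiv track=rewrite | github.com/pavel-gorlov/ai-dotfiles | src/ai_dotfiles/core/mcp_merge.py | derive_mcp_permissions
-- ===== SOURCE A (Python) =====
-- from collections.abc import Callable, Iterable
--
-- def derive_mcp_permissions(server_names: Iterable[str]) -> list[str]:
--     """Return ``["mcp__<name>__*", ...]`` — one wildcard entry per server.
--
--     Deduplicated, preserves first-seen order.
--     """
--     seen: set[str] = set()
--     result: list[str] = []
--     for name in server_names:
--         if name in seen:
--             continue
--         seen.add(name)
--         result.append(f"mcp__{name}__*")
--     return result
-- ===== SOURCE B (Python) =====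
-- def derive_mcp_permissions(server_names):
--     """Return ["mcp__<name>__*", ...] — one wildcard entry per server.
--
--     Sieve: emit the first pending name, then delete every later duplicate
--     of it by filtering, so no 'seen' set or membership test is needed.
--     """
--     pending = list(server_names)
--     result = []
--     while pending:
--         head = pending[0]
--         result.append(f"mcp__{head}__*")
--         pending = [x for x in pending[1:] if x != head]
--     return result
-- ===== Notes on version B (the rewrite author's own statement) =====
-- stated objective: alternative
-- what changed: Replaces the seen-set membership loop by a sieve: repeatedly emit the first pending name and filter all its later duplicates out of the rest, so dedup happens by elimination with no seen set or membership test (O(n*d) instead of O(n)).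
import Mathlib
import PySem

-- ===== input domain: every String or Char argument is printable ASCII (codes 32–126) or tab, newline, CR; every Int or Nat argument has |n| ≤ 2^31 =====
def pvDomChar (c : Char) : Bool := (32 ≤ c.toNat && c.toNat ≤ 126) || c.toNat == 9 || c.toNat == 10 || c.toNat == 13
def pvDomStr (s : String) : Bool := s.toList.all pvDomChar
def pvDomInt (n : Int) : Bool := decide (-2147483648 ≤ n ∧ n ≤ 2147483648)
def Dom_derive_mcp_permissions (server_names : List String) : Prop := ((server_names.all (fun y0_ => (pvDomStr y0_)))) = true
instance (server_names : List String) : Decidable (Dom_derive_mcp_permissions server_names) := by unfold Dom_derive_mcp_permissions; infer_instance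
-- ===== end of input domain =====

-- B replaces A's seen-set membership loop by a sieve that emits the first pending
-- name and filters its later duplicates away (alternative decomposition, same results).

-- ===== PORT A =====
-- A: one loop maintaining a seen set and a result list together.
def derive_mcp_permissions (server_names : List String) : List String :=
  (server_names.foldl
    (fun (st : PySem.Set String × List String) name =>
      if PySem.Set.contains st.1 name then st
      else (PySem.Set.add st.1 name, st.2 ++ ["mcp__" ++ name ++ "__*"]))
    (PySem.Set.empty, [])).2

-- ===== PORT B =====
-- B: sieve loop — take the head of the pending list, emit its entry, and
-- keep only the pending tail elements different from it.
def pvSieve (pending : List String) : List String :=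
  match pending with
  | [] => []
  | head :: rest =>
      ("mcp__" ++ head ++ "__*") :: pvSieve (rest.filter (fun x => x ≠ head))
termination_by pending.length
decreasing_by
  have h1 := List.length_filter_le (fun x : {x // x ∈ rest} => !decide (↑x = head)) rest.attach
  simp at h1 ⊢
  omega

def derive_mcp_permissions_alt (server_names : List String) : List String :=
  pvSieve server_names

-- ===== PRECONDITION & SPEC =====
def Spec_derive_mcp_permissions (server_names : List String) (out : List String) : Prop := out = derive_mcp_permissions_alt server_names
instance (server_names : List String) (out : List String) : Decidable (Spec_derive_mcp_permissions server_names out) := by unfold Spec_derive_mcp_permissions; infer_instance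

-- ===== CLAIM (what is proved, stated in full; the proofs are below) =====
def Claim_equal_derive_mcp_permissions : Prop := ∀ (server_names : List String), Dom_derive_mcp_permissions server_names → Spec_derive_mcp_permissions server_names (derive_mcp_permissions server_names)

-- ===== LEMMAS AND PROOFS =====

-- Set.add only ever appends, so the initial set is a prefix of any fold of adds.
theorem pv_foldl_add_prefix (l : List String) (s : PySem.Set String) :
    ∃ t, l.foldl PySem.Set.add s = s ++ t := by
  induction l generalizing s with
  | nil => exact ⟨[], by simp⟩
  | cons x l ih =>
    simp only [List.foldl_cons]
    by_cases h : PySem.Set.contains s x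
    · have : PySem.Set.add s x = s := by rw [PySem.Set.add, if_pos h]
      rw [this]; exact ih s
    · have hadd : PySem.Set.add s x = s ++ [x] := by rw [PySem.Set.add, if_neg h]
      obtain ⟨t, ht⟩ := ih (s ++ [x])
      exact ⟨x :: t, by rw [hadd, ht]; simp⟩

-- A's loop invariant: the result list is the accumulator followed by the images of
-- the elements that the seen-set fold appends past the initial seen-set.
theorem pv_invariant (l : List String) (s : PySem.Set String) (r : List String) :
    (l.foldl
      (fun (st : PySem.Set String × List String) name =>
        if PySem.Set.contains st.1 name then st
        else (PySem.Set.add st.1 name, st.2 ++ ["mcp__" ++ name ++ "__*"]))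
      (s, r)).2
    = r ++ ((l.foldl PySem.Set.add s).drop s.length).map (fun name => "mcp__" ++ name ++ "__*") := by
  induction l generalizing s r with
  | nil => simp
  | cons x l ih =>
    simp only [List.foldl_cons]
    by_cases h : PySem.Set.contains s x
    · have hs : PySem.Set.add s x = s := by rw [PySem.Set.add, if_pos h]
      simp only [h, if_pos, hs]
      exact ih s r
    · have hs : PySem.Set.add s x = s ++ [x] := by rw [PySem.Set.add, if_neg h]
      simp only [h, if_neg, Bool.false_eq_true, not_false_iff, hs]
      rw [ih (s ++ [x]) (r ++ ["mcp__" ++ x ++ "__*"])]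
      obtain ⟨t, ht⟩ := pv_foldl_add_prefix l (s ++ [x])
      rw [ht]
      have h1 : (s ++ [x] ++ t).drop s.length = [x] ++ t := by
        rw [List.append_assoc, List.drop_left]
      have h2 : (s ++ [x] ++ t).drop (s ++ [x]).length = t := List.drop_left
      rw [h2, h1]
      simp

-- Elements already in the seen set are skipped by the fold of adds.
theorem pv_foldl_add_filter (h : String) (t : List String) (s : PySem.Set String)
    (hh : h ∈ s) : t.foldl PySem.Set.add s = (t.filter (fun x => x ≠ h)).foldl PySem.Set.add s := by
  induction t generalizing s with
  | nil => rfl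
  | cons x t ih =>
    by_cases hx : x = h
    · subst hx
      have hc : PySem.Set.contains s x = true := by
        simp [PySem.Set.contains, hh]
      have : PySem.Set.add s x = s := by rw [PySem.Set.add, if_pos hc]
      simp only [List.foldl_cons, this, List.filter_cons]
      simp only [decide_not] at *
      simp [ih s hh]
    · simp only [List.foldl_cons, List.filter_cons]
      have : (decide ¬x = h) = true := by simp [hx]
      rw [this]
      exact ih (PySem.Set.add s x) (by
        unfold PySem.Set.add
        split <;> simp [hh])

-- Prepending a fresh element h commutes with the fold of adds when no later element equals h.
theorem pv_foldl_add_cons (h : String) (t : List String) (s : PySem.Set String)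
    (hall : ∀ x ∈ t, x ≠ h) : t.foldl PySem.Set.add (h :: s) = h :: t.foldl PySem.Set.add s := by
  induction t generalizing s with
  | nil => rfl
  | cons x t ih =>
    have hx : x ≠ h := hall x (by simp)
    have hc : PySem.Set.contains (h :: s) x = PySem.Set.contains s x := by
      simp [PySem.Set.contains, hx]
    simp only [List.foldl_cons]
    by_cases hmem : PySem.Set.contains s x
    · have h1 : PySem.Set.add (h :: s) x = h :: s := by rw [PySem.Set.add, hc, if_pos hmem]
      have h2 : PySem.Set.add s x = s := by rw [PySem.Set.add, if_pos hmem]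
      rw [h1, h2]; exact ih s (fun y hy => hall y (by simp [hy]))
    · have h1 : PySem.Set.add (h :: s) x = h :: (s ++ [x]) := by
        rw [PySem.Set.add, hc, if_neg hmem]; rfl
      have h2 : PySem.Set.add s x = s ++ [x] := by rw [PySem.Set.add, if_neg hmem]
      rw [h1, h2]; exact ih (s ++ [x]) (fun y hy => hall y (by simp [hy]))

-- dict.fromkeys-style dedup satisfies the sieve recursion.
theorem pv_dedup_sieve (h : String) (t : List String) :
    PySem.List.dedup (h :: t) = h :: PySem.List.dedup (t.filter (fun x => x ≠ h)) := by
  have e0 : PySem.List.dedup (h :: t) = t.foldl PySem.Set.add [h] := by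
    simp [PySem.List.dedup_eq_ofList, PySem.Set.ofList_eq_foldl, PySem.Set.add,
      PySem.Set.contains]
  rw [e0, pv_foldl_add_filter h t [h] (by simp)]
  rw [pv_foldl_add_cons h _ [] (by intro x hx; simpa using (List.of_mem_filter hx))]
  simp [PySem.List.dedup_eq_ofList, PySem.Set.ofList_eq_foldl]

-- B's sieve equals mapping the entry format over the ordered dedup.
theorem pv_sieve_eq_map_dedup (l : List String) :
    pvSieve l = (PySem.List.dedup l).map (fun name => "mcp__" ++ name ++ "__*") := by
  induction hl : l.length using Nat.strong_induction_on generalizing l with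
  | _ n ih =>
    cases l with
    | nil =>
      rw [show pvSieve [] = [] from by rw [pvSieve.eq_def]]
      simp [PySem.List.dedup_eq_ofList, PySem.Set.ofList_eq_foldl]
    | cons h t =>
      rw [show pvSieve (h :: t) = ("mcp__" ++ h ++ "__*") :: pvSieve (t.filter (fun x => x ≠ h)) from by
        rw [pvSieve.eq_def], pv_dedup_sieve]
      have hlt : (t.filter (fun x => x ≠ h)).length < n := by
        have := List.length_filter_le (fun x => x ≠ h) t
        simp only [List.length_cons] at hl; omega
      rw [ih _ hlt _ rfl]
      simp

-- ===== VERDICT (by name: the statement is the Claim_ definition above) =====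
theorem derive_mcp_permissions_spec : Claim_equal_derive_mcp_permissions := by
  intro server_names _
  show derive_mcp_permissions server_names = derive_mcp_permissions_alt server_names
  unfold derive_mcp_permissions derive_mcp_permissions_alt
  rw [pv_invariant server_names PySem.Set.empty [], pv_sieve_eq_map_dedup]
  simp [PySem.List.dedup_eq_ofList, PySem.Set.ofList_eq_foldl]
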